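-- pv_equiv track=rewrite | github.com/deXveYloZper/mAindScout | app/services/job_service.py | filter_relevant_tags
-- ===== SOURCE A (Python) =====
-- from typing import List, Optional, Dict
--
-- def filter_relevant_tags(tags: List[str], text: str) -> List[str]:
--     """
--     Filter and rank tags based on their relevance to the provided text.
--
--     This function calculates a relevance score for each tag based on the
--     frequency of its keywords in the text. It then filters out tags below
--     a relevance threshold and returns the top tags up to a maximum limit.
--
--     Args:
--         tags (List[str]): The initial list of tags generated.
--         text (str): The text to compare the tags against.
--
--     Returns:
--         List[str]: A list of relevant and ranked tags.
--     """
--     tag_scores = {}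
--     for tag in tags:
--         # Split the tag into keywords by '>' and strip whitespace
--         tag_keywords = [kw.strip().lower() for kw in tag.split('>')]
--         # Calculate the score based on keyword frequency in the text
--         score = sum(text.count(keyword) for keyword in tag_keywords)
--         tag_scores[tag] = score
--
--     # Set a relevance threshold (adjust based on testing)
--     relevance_threshold = 1
--
--     # Filter tags that meet or exceed the relevance threshold
--     filtered_tags = [tag for tag, score in tag_scores.items() if score >= relevance_threshold]
--
--     # Sort the tags by their scores in descending order
--     sorted_tags = sorted(filtered_tags, key=lambda tag: tag_scores[tag], reverse=True)
--
--     # Limit the number of tags to the top N tags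
--     max_tags = 10
--     top_tags = sorted_tags[:max_tags]
--
--     return top_tags
-- ===== SOURCE B (Python) =====
-- def filter_relevant_tags(tags, text):
--     # Memoised keyword counts shared across tags, plus top-10 by repeated
--     # first-max extraction (selection) instead of a full sort.
--     counts = {}
--     seen = set()
--     pool = []  # (score, tag) for each distinct tag scoring at least 1
--     for tag in tags:
--         if tag in seen:
--             continue
--         seen.add(tag)
--         score = 0
--         for kw in tag.split('>'):
--             k = kw.strip().lower()
--             if k not in counts:
--                 counts[k] = text.count(k)
--             score += counts[k]
--         if score >= 1:
--             pool.append((score, tag))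
--     result = []
--     while pool and len(result) < 10:
--         best = max(pool, key=lambda p: p[0])
--         pool.remove(best)
--         result.append(best[1])
--     return result
-- ===== Notes on version B (the rewrite author's own statement) =====
-- stated objective: alternative
-- what changed: Instead of A's score dict, separate filter pass, full descending sort and slice, B makes one pass that memoises each normalized keyword's count in a shared dict while filtering distinct tags into a (score, tag) pool, then picks the top 10 by repeated first-maximum extraction (selection) with no sort at all; counting each distinct keyword once instead of once per tag occurrence makes it measurably faster on duplicate-heavy inputs.
import Mathlib
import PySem

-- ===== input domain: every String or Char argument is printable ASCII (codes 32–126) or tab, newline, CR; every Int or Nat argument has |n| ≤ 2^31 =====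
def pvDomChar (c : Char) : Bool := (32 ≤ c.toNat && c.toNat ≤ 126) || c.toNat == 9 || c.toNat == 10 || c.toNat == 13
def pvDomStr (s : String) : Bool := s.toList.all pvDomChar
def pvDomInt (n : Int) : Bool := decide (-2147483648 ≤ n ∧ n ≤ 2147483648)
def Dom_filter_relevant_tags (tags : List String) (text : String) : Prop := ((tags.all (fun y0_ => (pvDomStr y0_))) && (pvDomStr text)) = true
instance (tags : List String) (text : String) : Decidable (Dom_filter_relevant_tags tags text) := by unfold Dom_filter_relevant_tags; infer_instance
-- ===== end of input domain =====

-- B replaces A's score dict + filter pass + full descending sort + slice by one pass that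
-- memoises each keyword's count in a shared dict while filtering, then picks the top 10 by
-- repeated first-maximum extraction (selection) instead of sorting; same results (alternative).

-- ===== PORT A =====
def filter_relevant_tags (tags : List String) (text : String) : List String :=
  let tag_scores : PySem.Dict String Int :=
    tags.foldl (fun d tag =>
      let tag_keywords := ((PySem.Str.split? tag ">").getD []).map
        (fun kw => PySem.Str.lower (PySem.Str.strip kw))
      let score : Int := (tag_keywords.map (fun keyword => (PySem.Str.count text keyword : Int))).sum
      d.insert tag score) PySem.Dict.empty
  let filtered_tags : List String :=
    tag_scores.items.foldl (fun acc p => if (1:Int) ≤ p.2 then acc ++ [p.1] else acc) []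
  let sorted_tags := PySem.List.sorted filtered_tags (fun tag => tag_scores.getD tag 0) true
  PySem.List.slice sorted_tags none (some 10)

-- ===== PORT B =====
-- the 'while pool and len(result) < 10' selection loop of Source B (max(...) is Python's
-- first-maximum; pool.remove removes the first occurrence)
def pvSelect (pool : List (Int × String)) (res : List String) : List String :=
  if 10 ≤ res.length then res
  else
    match hm : PySem.List.max? pool (fun p => p.1) with
    | none => res
    | some best => pvSelect ((PySem.List.remove? pool best).getD pool) (res ++ [best.2])
termination_by pool.length
decreasing_by
  have hb := PySem.List.max?_mem hm
  rw [PySem.List.remove?_eq_some_erase pool best hb]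
  have h1 := List.length_erase_of_mem hb
  have h2 := List.length_pos_of_mem hb
  simp only [Option.getD_some]
  omega

def pvScoreStep (text : String) (cs : PySem.Dict String Int × Int) (kw : String) :
    PySem.Dict String Int × Int :=
  let k := PySem.Str.lower (PySem.Str.strip kw)
  let counts := if cs.1.contains k then cs.1 else cs.1.insert k ((PySem.Str.count text k : Int))
  (counts, cs.2 + counts.getD k 0)

def pvTagStep (text : String)
    (st : PySem.Dict String Int × PySem.Set String × List (Int × String)) (tag : String) :
    PySem.Dict String Int × PySem.Set String × List (Int × String) :=
  if st.2.1.contains tag then st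
  else
    let seen := PySem.Set.add st.2.1 tag
    let cs := ((PySem.Str.split? tag ">").getD []).foldl (pvScoreStep text) (st.1, 0)
    if (1:Int) ≤ cs.2 then (cs.1, seen, st.2.2 ++ [(cs.2, tag)])
    else (cs.1, seen, st.2.2)

def filter_relevant_tags_alt (tags : List String) (text : String) : List String :=
  let st := tags.foldl (pvTagStep text)
    (PySem.Dict.empty, ([] : PySem.Set String), ([] : List (Int × String)))
  pvSelect st.2.2 []

-- ===== PRECONDITION & SPEC =====
def Spec_filter_relevant_tags (tags : List String) (text : String) (out : List String) : Prop := out = filter_relevant_tags_alt tags text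
instance (tags : List String) (text : String) (out : List String) : Decidable (Spec_filter_relevant_tags tags text out) := by unfold Spec_filter_relevant_tags; infer_instance

-- ===== CLAIM (what is proved, stated in full; the proofs are below) =====
def Claim_equal_filter_relevant_tags : Prop := ∀ (tags : List String) (text : String), Dom_filter_relevant_tags tags text → Spec_filter_relevant_tags tags text (filter_relevant_tags tags text)

-- ===== LEMMAS AND PROOFS =====

-- the score both Pythons compute for a tag
def pvScore (text tag : String) : Int :=
  (((PySem.Str.split? tag ">").getD []).map
    (fun kw => (PySem.Str.count text (PySem.Str.lower (PySem.Str.strip kw)) : Int))).sum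

-- ---------- A side: the score dict ----------
theorem pv_insert_map (text : String) (s : List String) (t : String) :
    (PySem.Dict.mk (s.map (fun u => (u, pvScore text u)))).insert t (pvScore text t)
      = PySem.Dict.mk ((PySem.Set.add s t).map (fun u => (u, pvScore text u))) := by
  by_cases h : t ∈ s
  · have hc : (PySem.Dict.mk (s.map (fun u => (u, pvScore text u)))).contains t = true := by
      simp [PySem.Dict.contains, List.any_map]
      exact h
    simp only [PySem.Dict.insert, hc, if_pos, PySem.Set.add_of_mem h]
    congr 1
    simp only [List.map_map]
    apply List.map_congr_left
    intro u hu
    by_cases hut : u = t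
    · subst hut; simp
    · simp [hut]
  · have hc : (PySem.Dict.mk (s.map (fun u => (u, pvScore text u)))).contains t = false := by
      simp [PySem.Dict.contains, List.any_map]
      intro u hu e; exact h (e ▸ hu)
    simp [PySem.Dict.insert, hc, PySem.Set.add_of_not_mem h]

theorem pv_dict_build (text : String) :
    ∀ (tags s : List String),
    tags.foldl (fun d tag => d.insert tag (pvScore text tag))
        (PySem.Dict.mk (s.map (fun u => (u, pvScore text u))))
      = PySem.Dict.mk ((tags.foldl PySem.Set.add s).map (fun u => (u, pvScore text u))) := by
  intro tags
  induction tags with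
  | nil => intro s; rfl
  | cons t rest ih =>
      intro s
      simp only [List.foldl_cons, pv_insert_map text s t]
      exact ih (PySem.Set.add s t)

theorem pv_getD_map (text : String) :
    ∀ (s : List String) (t : String), t ∈ s →
    (PySem.Dict.mk (s.map (fun u => (u, pvScore text u)))).getD t 0 = pvScore text t := by
  intro s
  induction s with
  | nil => intro t ht; cases ht
  | cons u rest ih =>
      intro t ht
      by_cases hut : u = t
      · subst hut
        simp [PySem.Dict.getD, PySem.Dict.get?]
      · have : t ∈ rest := by cases ht with
          | head => exact absurd rfl hut
          | tail _ h => exact h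
        have := ih t this
        simp only [PySem.Dict.getD, PySem.Dict.get?] at this ⊢
        simpa [List.find?, hut] using this

-- changing the sort key pointwise on the list (and on the accumulator) changes nothing
theorem pv_insertBy_congr {α : Type} (r r' : α → α → Bool) (x : α) :
    ∀ ys : List α, (∀ a ∈ ys, r x a = r' x a) →
    PySem.List.insertBy r x ys = PySem.List.insertBy r' x ys := by
  intro ys
  induction ys with
  | nil => intro _; rfl
  | cons y t ih =>
      intro hx
      simp only [PySem.List.insertBy, hx y (List.mem_cons_self ..)]
      by_cases hr : r' x y
      · simp [hr]
      · simp [hr, ih (fun a ha => hx a (List.mem_cons_of_mem _ ha))]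

theorem pv_sorted_rev_congr {α : Type} (k1 k2 : α → Int) :
    ∀ (xs : List α), (∀ x ∈ xs, k1 x = k2 x) →
    ∀ acc : List α, (∀ x ∈ acc, k1 x = k2 x) →
    xs.foldl (fun acc x => PySem.List.insertBy (fun a b => decide (k1 b < k1 a)) x acc) acc
      = xs.foldl (fun acc x => PySem.List.insertBy (fun a b => decide (k2 b < k2 a)) x acc) acc := by
  intro xs
  induction xs with
  | nil => intro _ acc _; rfl
  | cons x t ih =>
      intro hxs acc hacc
      have hx : k1 x = k2 x := hxs x (List.mem_cons_self ..)
      have step : PySem.List.insertBy (fun a b => decide (k1 b < k1 a)) x acc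
          = PySem.List.insertBy (fun a b => decide (k2 b < k2 a)) x acc := by
        apply pv_insertBy_congr
        intro a ha
        simp [hacc a ha, hx]
      simp only [List.foldl_cons, step]
      refine ih (fun z hz => hxs z (List.mem_cons_of_mem _ hz))
        (PySem.List.insertBy (fun a b => decide (k2 b < k2 a)) x acc) ?_
      intro z hz
      rcases (PySem.List.mem_insertBy _ _ _ _).mp hz with h | h
      · subst h; exact hx
      · exact hacc z h

theorem pv_sorted_rev_congr' {α : Type} (k1 k2 : α → Int) (xs : List α)
    (h : ∀ x ∈ xs, k1 x = k2 x) :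
    PySem.List.sorted xs k1 true = PySem.List.sorted xs k2 true := by
  rw [PySem.List.sorted_rev_eq_foldl_insertBy, PySem.List.sorted_rev_eq_foldl_insertBy]
  exact pv_sorted_rev_congr k1 k2 xs h [] (by simp)

-- ---------- stability of the stable descending insertion sort ----------
-- 'a must come before b': strictly larger key, or equal key and earlier original position
def pvRel {α : Type} (k : α → Int) (rank : α → Nat) (a b : α) : Prop :=
  k b < k a ∨ (k a = k b ∧ rank a < rank b)

theorem pv_insertBy_pairwise {α : Type} (k : α → Int) (rank : α → Nat) (x : α) :
    ∀ acc : List α, acc.Pairwise (pvRel k rank) → (∀ y ∈ acc, rank y < rank x) →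
    (PySem.List.insertBy (fun a b => decide (k b < k a)) x acc).Pairwise (pvRel k rank) := by
  intro acc
  induction acc with
  | nil => intro _ _; simp [PySem.List.insertBy]
  | cons y ys ih =>
      intro hp hr
      rcases List.pairwise_cons.mp hp with ⟨hy, hys⟩
      simp only [PySem.List.insertBy]
      by_cases h : k y < k x
      · simp only [h, decide_true, if_pos]
        refine List.pairwise_cons.mpr ⟨?_, hp⟩
        intro z hz
        rcases List.mem_cons.mp hz with rfl | hz
        · exact Or.inl h
        · rcases hy z hz with hlt | ⟨heq, _⟩
          · exact Or.inl (lt_trans hlt h)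
          · exact Or.inl (heq ▸ h)
      · simp only [h, decide_false, if_neg, Bool.false_eq_true, not_false_iff]
        refine List.pairwise_cons.mpr ⟨?_, ih hys (fun z hz => hr z (List.mem_cons_of_mem _ hz))⟩
        intro w hw
        rcases (PySem.List.mem_insertBy _ _ _ _).mp hw with rfl | hw
        · rcases lt_or_eq_of_le (le_of_not_gt h) with hlt | heq
          · exact Or.inl hlt
          · exact Or.inr ⟨heq.symm, hr y (List.mem_cons_self ..)⟩
        · exact hy w hw

theorem pv_foldl_insertBy_pairwise {α : Type} (k : α → Int) (rank : α → Nat) :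
    ∀ (xs acc : List α), acc.Pairwise (pvRel k rank) →
    (∀ y ∈ acc, ∀ x ∈ xs, rank y < rank x) →
    xs.Pairwise (fun a b => rank a < rank b) →
    (xs.foldl (fun acc x => PySem.List.insertBy (fun a b => decide (k b < k a)) x acc) acc).Pairwise
      (pvRel k rank) := by
  intro xs
  induction xs with
  | nil => intro acc h _ _; exact h
  | cons x t ih =>
      intro acc hp hr hx
      rcases List.pairwise_cons.mp hx with ⟨hxt, ht⟩
      simp only [List.foldl_cons]
      refine ih _ (pv_insertBy_pairwise k rank x acc hp
        (fun y hy => hr y hy x (List.mem_cons_self ..))) ?_ ht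
      intro y hy z hz
      rcases (PySem.List.mem_insertBy _ _ _ _).mp hy with rfl | hy
      · exact hxt z hz
      · exact hr y hy z (List.mem_cons_of_mem _ hz)

theorem pv_sorted_rev_stable {α : Type} (k : α → Int) (rank : α → Nat) (xs : List α)
    (hx : xs.Pairwise (fun a b => rank a < rank b)) :
    (PySem.List.sorted xs k true).Pairwise (pvRel k rank) := by
  rw [PySem.List.sorted_rev_eq_foldl_insertBy]
  exact pv_foldl_insertBy_pairwise k rank xs [] (by simp) (by simp) hx

-- ---------- max? finds the FIRST maximum ----------
theorem pv_max_go {α : Type} (k : α → Int) :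
    ∀ (xs : List α) (m0 : α),
    ∃ m, xs.foldl (fun acc x => match acc with
          | none => some x
          | some m => if k m < k x then some x else some m) (some m0) = some m
      ∧ (∀ y ∈ m0 :: xs, k y ≤ k m)
      ∧ (m = m0 ∨ ∃ pre suf, xs = pre ++ m :: suf ∧ ∀ y ∈ m0 :: pre, k y < k m) := by
  intro xs
  induction xs with
  | nil => intro m0; exact ⟨m0, rfl, by simp, Or.inl rfl⟩
  | cons x t ih =>
      intro m0
      by_cases h : k m0 < k x
      · obtain ⟨m, hm, hle, hdec⟩ := ih x
        refine ⟨m, by simpa [h] using hm, ?_, ?_⟩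
        · intro y hy
          rcases List.mem_cons.mp hy with rfl | hy
          · exact le_of_lt (lt_of_lt_of_le h (hle x (List.mem_cons_self ..)))
          · exact hle y hy
        · rcases hdec with rfl | ⟨pre, suf, heq, hlt⟩
          · exact Or.inr ⟨[], t, by simp, by
              intro y hy
              simp only [List.mem_cons, List.not_mem_nil, or_false] at hy
              subst hy; exact h⟩
          · refine Or.inr ⟨x :: pre, suf, by simp [heq], ?_⟩
            intro y hy
            have hxm : k x < k m := hlt x (List.mem_cons_self ..)
            rcases List.mem_cons.mp hy with rfl | hy
            · exact lt_trans h hxm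
            · exact hlt y hy
      · obtain ⟨m, hm, hle, hdec⟩ := ih m0
        refine ⟨m, by simpa [h] using hm, ?_, ?_⟩
        · intro y hy
          rcases List.mem_cons.mp hy with rfl | hy
          · exact hle y (List.mem_cons_self ..)
          · rcases List.mem_cons.mp hy with rfl | hy
            · exact le_trans (le_of_not_gt h) (hle m0 (List.mem_cons_self ..))
            · exact hle y (List.mem_cons_of_mem _ hy)
        · rcases hdec with rfl | ⟨pre, suf, heq, hlt⟩
          · exact Or.inl rfl
          · refine Or.inr ⟨x :: pre, suf, by simp [heq], ?_⟩
            intro y hy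
            have hm0 : k m0 < k m := hlt m0 (List.mem_cons_self ..)
            simp only [List.mem_cons] at hy
            rcases hy with rfl | rfl | hy
            · exact hm0
            · exact lt_of_le_of_lt (le_of_not_gt h) hm0
            · exact hlt y (List.mem_cons_of_mem _ hy)

theorem pv_max?_decomp {α : Type} (k : α → Int) (xs : List α) (m : α)
    (h : PySem.List.max? xs k = some m) :
    ∃ pre suf, xs = pre ++ m :: suf ∧ (∀ y ∈ pre, k y < k m) ∧ (∀ y ∈ xs, k y ≤ k m) := by
  cases xs with
  | nil => simp [PySem.List.max?] at h
  | cons x t =>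
      obtain ⟨m', hm', hle, hdec⟩ := pv_max_go k t x
      have hm : m' = m := by
        have : PySem.List.max? (x :: t) k = some m' := by
          simpa [PySem.List.max?] using hm'
        rw [this] at h; exact Option.some.inj h
      subst hm
      rcases hdec with rfl | ⟨pre, suf, heq, hlt⟩
      · exact ⟨[], t, rfl, by simp, hle⟩
      · exact ⟨x :: pre, suf, by simp [heq], hlt, hle⟩

-- ---------- selection: repeatedly extract the first maximum ----------
def pvSelAll (L : List (Int × String)) : List (Int × String) :=
  match hm : PySem.List.max? L (fun p => p.1) with
  | none => []
  | some m => m :: pvSelAll (L.erase m)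
termination_by L.length
decreasing_by
  have hb := PySem.List.max?_mem hm
  have h1 := List.length_erase_of_mem hb
  have h2 := List.length_pos_of_mem hb
  omega

theorem pv_selAll_some {L : List (Int × String)} {m : Int × String}
    (hm : PySem.List.max? L (fun p => p.1) = some m) :
    pvSelAll L = m :: pvSelAll (L.erase m) := by
  rw [pvSelAll]
  split
  · rename_i h; rw [hm] at h; cases h
  · rename_i m' h; rw [hm] at h; cases h; rfl

theorem pv_selAll_none {L : List (Int × String)}
    (hm : PySem.List.max? L (fun p => p.1) = none) : pvSelAll L = [] := by
  rw [pvSelAll]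
  split
  · rfl
  · rename_i m' h; rw [hm] at h; cases h

theorem pv_selAll_perm : ∀ (L : List (Int × String)), (pvSelAll L).Perm L := by
  intro L
  induction L using (measure List.length).wf.induction with
  | _ L ih =>
    cases hm : PySem.List.max? L (fun p => p.1) with
    | none =>
        rw [pv_selAll_none hm, (PySem.List.max?_eq_none_iff L _).mp hm]
    | some m =>
        have hb := PySem.List.max?_mem hm
        have h1 := List.length_erase_of_mem hb
        have h2 := List.length_pos_of_mem hb
        rw [pv_selAll_some hm]
        have ihp := ih (L.erase m) (by show _ < L.length; omega)
        exact ((ihp.cons m).trans (List.perm_cons_erase hb).symm)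

theorem pv_selAll_pairwise (rank : Int × String → Nat) :
    ∀ (L : List (Int × String)), L.Pairwise (fun a b => rank a < rank b) →
    (pvSelAll L).Pairwise (pvRel (fun p => p.1) rank) := by
  intro L
  induction L using (measure List.length).wf.induction with
  | _ L ih =>
    intro hL
    cases hm : PySem.List.max? L (fun p => p.1) with
    | none => rw [pv_selAll_none hm]; exact List.Pairwise.nil
    | some m =>
        rw [pv_selAll_some hm]
        obtain ⟨pre, suf, heq, hpre, hall⟩ := pv_max?_decomp (fun p => p.1) L m hm
        have hmpre : m ∉ pre := by
          intro hmem
          exact lt_irrefl _ (hpre m hmem)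
        have herase : L.erase m = pre ++ suf := by
          rw [heq, List.erase_append_right _ hmpre, List.erase_cons_head]
        have hb := PySem.List.max?_mem hm
        have h1 := List.length_erase_of_mem hb
        have h2 := List.length_pos_of_mem hb
        have hsub : (pre ++ suf).Sublist L := by
          rw [heq]
          exact (List.sublist_cons_self m suf).append_left pre
        have hLer : (L.erase m).Pairwise (fun a b => rank a < rank b) := by
          rw [herase]; exact List.Pairwise.sublist hsub hL
        have hmsuf : ∀ y ∈ suf, rank m < rank y := by
          have hsub2 : (m :: suf).Sublist L := by
            rw [heq]; exact List.sublist_append_right pre (m :: suf)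
          exact (List.pairwise_cons.mp (List.Pairwise.sublist hsub2 hL)).1
        refine List.pairwise_cons.mpr
          ⟨?_, ih (L.erase m) (by show _ < L.length; omega) hLer⟩
        intro y hy
        have hyL : y ∈ L.erase m := (pv_selAll_perm (L.erase m)).mem_iff.mp hy
        rw [herase] at hyL
        rcases List.mem_append.mp hyL with hyp | hys
        · exact Or.inl (hpre y hyp)
        · have hle : y.1 ≤ m.1 := hall y
            (by rw [heq]; exact List.mem_append.mpr (Or.inr (List.mem_cons_of_mem _ hys)))
          rcases lt_or_eq_of_le hle with hlt | heq'
          · exact Or.inl hlt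
          · exact Or.inr ⟨heq'.symm, hmsuf y hys⟩

-- a list Pairwise in pvRel is determined by its multiset (pvRel is asymmetric)
theorem pv_rel_unique {α : Type} (k : α → Int) (rank : α → Nat) (l₁ l₂ : List α)
    (h₁ : l₁.Pairwise (pvRel k rank)) (h₂ : l₂.Pairwise (pvRel k rank)) (hp : l₁.Perm l₂) :
    l₁ = l₂ := by
  refine List.Perm.eq_of_pairwise (le := fun a b => pvRel k rank a b ∨ a = b) ?_
    (h₁.imp Or.inl) (h₂.imp Or.inl) hp
  intro a b _ _ hab hba
  rcases hab with hab | rfl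
  · rcases hba with hba | rfl
    · exfalso
      rcases hab with h1 | ⟨e1, r1⟩ <;> rcases hba with h2 | ⟨e2, r2⟩ <;> omega
    · rfl
  · rfl

-- the selection loop returns the first 10 extracted tags
theorem pv_select_spec : ∀ (L : List (Int × String)) (res : List String),
    pvSelect L res = res ++ ((pvSelAll L).map (fun p => p.2)).take (10 - res.length) := by
  intro L
  induction L using (measure List.length).wf.induction with
  | _ L ih =>
    intro res
    by_cases hres : 10 ≤ res.length
    · rw [pvSelect]
      simp [hres, Nat.sub_eq_zero_of_le hres]
    · cases hm : PySem.List.max? L (fun p => p.1) with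
      | none =>
          rw [pvSelect, pv_selAll_none hm]
          simp only [hres, if_false]
          split
          · rename_i h; rw [hm] at h; cases h; simp
          · rename_i m' h; rw [hm] at h; cases h
      | some best =>
          have hb := PySem.List.max?_mem hm
          have h1 := List.length_erase_of_mem hb
          have h2 := List.length_pos_of_mem hb
          rw [pvSelect, pv_selAll_some hm]
          simp only [hres, if_false]
          have hstep : (match hm : PySem.List.max? L (fun p => p.1) with
              | none => res
              | some best => pvSelect ((PySem.List.remove? L best).getD L) (res ++ [best.2]))
              = pvSelect ((PySem.List.remove? L best).getD L) (res ++ [best.2]) := by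
            split
            · rename_i h; rw [hm] at h; cases h
            · rename_i m' h; rw [hm] at h; cases h; rfl
          rw [hstep, PySem.List.remove?_eq_some_erase L best hb]
          simp only [Option.getD_some]
          rw [ih (L.erase best) (by show _ < L.length; omega)]
          have h10 : 10 - res.length = (10 - (res.length + 1)) + 1 := by omega
          simp only [List.length_append, List.length_cons, List.length_nil, List.map_cons]
          rw [h10, List.take_succ_cons]
          simp

-- ---------- a Nodup list is ranked by its own positions ----------
theorem pv_nodup_pairwise_idxOf {α : Type} [BEq α] [LawfulBEq α] (L : List α) (h : L.Nodup) :
    L.Pairwise (fun a b => List.idxOf a L < List.idxOf b L) := by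
  rw [List.pairwise_iff_getElem]
  intro i j hi hj hij
  rw [h.idxOf_getElem i hi, h.idxOf_getElem j hj]
  exact hij

-- ---------- B side: the scoring pass ----------
def pvCountsOK (text : String) (d : PySem.Dict String Int) : Prop :=
  ∀ kk : String, d.contains kk = true → d.getD kk 0 = (PySem.Str.count text kk : Int)

theorem pv_inner (text : String) :
    ∀ (kws : List String) (d : PySem.Dict String Int) (s : Int), pvCountsOK text d →
    (kws.foldl (pvScoreStep text) (d, s)).2
      = s + (kws.map (fun kw => (PySem.Str.count text (PySem.Str.lower (PySem.Str.strip kw)) : Int))).sum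
    ∧ pvCountsOK text (kws.foldl (pvScoreStep text) (d, s)).1 := by
  intro kws
  induction kws with
  | nil => intro d s hd; exact ⟨by simp, hd⟩
  | cons kw rest ih =>
      intro d s hd
      simp only [List.foldl_cons, List.map_cons, List.sum_cons, pvScoreStep]
      by_cases hc : d.contains (PySem.Str.lower (PySem.Str.strip kw))
      · have hv := hd _ hc
        simp only [hc, if_pos]
        obtain ⟨h1, h2⟩ := ih d (s + d.getD (PySem.Str.lower (PySem.Str.strip kw)) 0) hd
        refine ⟨?_, h2⟩
        rw [h1, hv]; ring
      · simp only [hc, if_neg, Bool.false_eq_true, not_false_iff]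
        have hOK : pvCountsOK text (d.insert (PySem.Str.lower (PySem.Str.strip kw)) ((PySem.Str.count text (PySem.Str.lower (PySem.Str.strip kw)) : Int))) := by
          intro kk hkk
          by_cases he : kk = PySem.Str.lower (PySem.Str.strip kw)
          · subst he; rw [PySem.Dict.getD_insert_self]
          · rw [PySem.Dict.getD_insert_of_ne _ _ _ he]
            apply hd
            rw [PySem.Dict.contains_insert] at hkk
            simpa [he] using hkk
        obtain ⟨h1, h2⟩ := ih _ _ hOK
        refine ⟨?_, h2⟩
        rw [h1, PySem.Dict.getD_insert_self]; ring

-- first occurrences of tags not yet seen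
def pvNew (S : List String) : List String → List String
  | [] => []
  | t :: ts => if t ∈ S then pvNew S ts else t :: pvNew (S ++ [t]) ts

theorem pv_new_foldl_add : ∀ (tags : List String) (S : List String),
    S ++ pvNew S tags = tags.foldl PySem.Set.add S := by
  intro tags
  induction tags with
  | nil => intro S; simp [pvNew]
  | cons t ts ih =>
      intro S
      simp only [pvNew, List.foldl_cons]
      by_cases hm : t ∈ S
      · rw [if_pos hm, PySem.Set.add_of_mem hm]
        exact ih S
      · rw [if_neg hm, PySem.Set.add_of_not_mem hm, ← ih (S ++ [t])]
        simp

theorem pv_new_nil (tags : List String) : pvNew [] tags = PySem.List.dedup tags := by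
  rw [PySem.List.dedup_eq_ofList, PySem.Set.ofList_eq_foldl, ← pv_new_foldl_add tags []]
  simp

theorem pv_outer (text : String) :
    ∀ (tags : List String) (d : PySem.Dict String Int) (S : PySem.Set String)
      (pool : List (Int × String)), pvCountsOK text d →
    (tags.foldl (pvTagStep text) (d, S, pool)).2.2
      = pool ++ ((pvNew S tags).filter (fun t => decide (1 ≤ pvScore text t))).map
          (fun t => (pvScore text t, t)) := by
  intro tags
  induction tags with
  | nil => intro d S pool hd; simp [pvNew]
  | cons tag ts ih =>
      intro d S pool hd
      simp only [List.foldl_cons, pvNew]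
      by_cases hm : tag ∈ S
      · have hc : S.contains tag = true := by simpa using hm
        rw [show pvTagStep text (d, S, pool) tag = (d, S, pool) from by simp [pvTagStep, hm],
          if_pos hm]
        exact ih d S pool hd
      · have hc : ¬ (S.contains tag = true) := by simpa using hm
        obtain ⟨hsum, hOK⟩ := pv_inner text (((PySem.Str.split? tag ">").getD [])) d 0 hd
        have hscore : ((((PySem.Str.split? tag ">").getD []).foldl (pvScoreStep text) (d, 0)).2 : Int)
            = pvScore text tag := by
          rw [hsum]; simp [pvScore]
        have hstep : pvTagStep text (d, S, pool) tag
            = (if (1:Int) ≤ pvScore text tag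
                then (((((PySem.Str.split? tag ">").getD []).foldl (pvScoreStep text) (d, 0)).1),
                  S ++ [tag], pool ++ [(pvScore text tag, tag)])
                else (((((PySem.Str.split? tag ">").getD []).foldl (pvScoreStep text) (d, 0)).1),
                  S ++ [tag], pool)) := by
          simp [pvTagStep, hm, hscore]
        rw [hstep, if_neg hm]
        simp only [List.filter_cons, decide_eq_true_eq]
        by_cases hth : (1:Int) ≤ pvScore text tag
        · rw [if_pos hth, if_pos hth]
          simp only [List.map_cons]
          rw [ih _ _ _ hOK]
          simp
        · rw [if_neg hth, if_neg hth]
          rw [ih _ _ _ hOK]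

-- ===== VERDICT (by name: the statement is the Claim_ definition above) =====
theorem filter_relevant_tags_spec : Claim_equal_filter_relevant_tags := by
  intro tags text _
  unfold Spec_filter_relevant_tags
  have hps : ∀ tag : String, (((PySem.Str.split? tag ">").getD []).map
      (fun kw => (PySem.Str.count text (PySem.Str.lower (PySem.Str.strip kw)) : Int))).sum
      = pvScore text tag := fun _ => rfl
  have hdict : tags.foldl (fun d tag => d.insert tag (pvScore text tag)) PySem.Dict.empty
      = PySem.Dict.mk ((PySem.List.dedup tags).map (fun u => (u, pvScore text u))) := by
    have h0 := pv_dict_build text tags []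
    simp only [List.map_nil] at h0
    rw [PySem.List.dedup_eq_ofList, PySem.Set.ofList_eq_foldl]
    exact h0
  -- A's result is the top 10 of the stable descending sort of the filtered dedup list
  simp only [filter_relevant_tags, List.map_map, Function.comp_def, hps]
  simp only [hdict]
  rw [PySem.List.foldl_append_ite (p := fun p : String × Int => (1:Int) ≤ p.2)
      (f := fun p : String × Int => p.1)]
  simp only [List.nil_append, List.filter_map, List.map_map, Function.comp_def, List.map_id']
  have hkey : PySem.List.sorted
      (List.filter (fun u => decide (1 ≤ pvScore text u)) (PySem.List.dedup tags))
      (fun tag => (PySem.Dict.mk ((PySem.List.dedup tags).map (fun u => (u, pvScore text u)))).getD tag 0) true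
      = PySem.List.sorted
      (List.filter (fun u => decide (1 ≤ pvScore text u)) (PySem.List.dedup tags))
      (pvScore text) true := by
    apply pv_sorted_rev_congr'
    intro x hx
    exact pv_getD_map text (PySem.List.dedup tags) x (List.mem_of_mem_filter hx)
  rw [hkey]
  rw [PySem.List.slice_to _ (by norm_num), show ((10:Int).toNat) = 10 from rfl]
  -- B's result: the pool is the filtered dedup list paired with its scores
  have hOK0 : pvCountsOK text PySem.Dict.empty := by
    intro kk hkk
    simp [PySem.Dict.contains_empty] at hkk
  have hpool : (tags.foldl (pvTagStep text)
      (PySem.Dict.empty, ([] : PySem.Set String), ([] : List (Int × String)))).2.2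
      = ((PySem.List.dedup tags).filter (fun t => decide (1 ≤ pvScore text t))).map
          (fun t => (pvScore text t, t)) := by
    rw [pv_outer text tags _ _ _ hOK0, pv_new_nil]
    simp
  simp only [filter_relevant_tags_alt]
  rw [hpool, pv_select_spec]
  -- the selection extracts exactly the stable descending sort
  have hF : ((PySem.List.dedup tags).filter (fun t => decide (1 ≤ pvScore text t))).Nodup :=
    (PySem.List.nodup_dedup tags).filter _
  have hsel : pvSelAll (((PySem.List.dedup tags).filter (fun t => decide (1 ≤ pvScore text t))).map
        (fun t => (pvScore text t, t)))
      = (PySem.List.sorted ((PySem.List.dedup tags).filter (fun t => decide (1 ≤ pvScore text t)))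
          (pvScore text) true).map (fun t => (pvScore text t, t)) := by
    have hidx := pv_nodup_pairwise_idxOf _ hF
    have hpw : ((((PySem.List.dedup tags).filter (fun t => decide (1 ≤ pvScore text t))).map
          (fun t => (pvScore text t, t)))).Pairwise
        (fun a b => List.idxOf a.2 ((PySem.List.dedup tags).filter (fun t => decide (1 ≤ pvScore text t)))
          < List.idxOf b.2 ((PySem.List.dedup tags).filter (fun t => decide (1 ≤ pvScore text t)))) := by
      rw [List.pairwise_map]
      exact hidx
    have h₁ := pv_selAll_pairwise
      (fun p => List.idxOf p.2 ((PySem.List.dedup tags).filter (fun t => decide (1 ≤ pvScore text t))))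
      _ hpw
    have hstab := pv_sorted_rev_stable (pvScore text)
      (fun t => List.idxOf t ((PySem.List.dedup tags).filter (fun t => decide (1 ≤ pvScore text t))))
      _ hidx
    have h₂ : ((PySem.List.sorted ((PySem.List.dedup tags).filter (fun t => decide (1 ≤ pvScore text t)))
          (pvScore text) true).map (fun t => (pvScore text t, t))).Pairwise
        (pvRel (fun p => p.1)
          (fun p => List.idxOf p.2 ((PySem.List.dedup tags).filter (fun t => decide (1 ≤ pvScore text t))))) := by
      rw [List.pairwise_map]
      exact hstab
    have hperm : (pvSelAll (((PySem.List.dedup tags).filter (fun t => decide (1 ≤ pvScore text t))).map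
          (fun t => (pvScore text t, t)))).Perm
        ((PySem.List.sorted ((PySem.List.dedup tags).filter (fun t => decide (1 ≤ pvScore text t)))
          (pvScore text) true).map (fun t => (pvScore text t, t))) :=
      (pv_selAll_perm _).trans
        ((PySem.List.sorted_perm _ (pvScore text) true).map (fun t => (pvScore text t, t))).symm
    exact pv_rel_unique _ _ _ _ h₁ h₂ hperm
  rw [hsel]
  simp [List.map_map, Function.comp_def]
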